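-- pv_equiv track=rewrite | github.com/adiseal/edabit-practices | A Simple Check.py | simple_check
-- ===== SOURCE A (Python) =====
-- def simple_check(a, b):
--     count = 0
--     while a > 0 and b > 0:
--         if a > b:
--             if a % b == 0:
--                 count += 1
--         else:
--             if b % a == 0:
--                 count += 1
--         a -= 1
--         b -= 1
--     return count
-- ===== SOURCE B (Python) =====
-- def simple_check(a, b):
--     # Count of t in [0, min(a,b)) with max(a-t,b-t) divisible by min(a-t,b-t):
--     # the smaller value runs through m = min(a,b), ..., 1 and the difference
--     # d = |a-b| is constant, so this is the number of divisors of d that are <= min(a,b).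
--     m = a if a < b else b
--     if m <= 0:
--         return 0
--     d = a - b if a > b else b - a
--     if d == 0:
--         return m
--     count = 0
--     i = 1
--     while i * i <= d:
--         if d % i == 0:
--             if i <= m:
--                 count += 1
--             j = d // i
--             if j != i and j <= m:
--                 count += 1
--         i += 1
--     return count
-- ===== Notes on version B (the rewrite author's own statement) =====
-- stated objective: faster
-- what changed: Replaced the simultaneous decrement loop (O(min(a,b)) iterations) by counting divisors of the invariant difference |a-b| that are <= min(a,b), enumerating divisor pairs up to sqrt(|a-b|).
import Mathlib
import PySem

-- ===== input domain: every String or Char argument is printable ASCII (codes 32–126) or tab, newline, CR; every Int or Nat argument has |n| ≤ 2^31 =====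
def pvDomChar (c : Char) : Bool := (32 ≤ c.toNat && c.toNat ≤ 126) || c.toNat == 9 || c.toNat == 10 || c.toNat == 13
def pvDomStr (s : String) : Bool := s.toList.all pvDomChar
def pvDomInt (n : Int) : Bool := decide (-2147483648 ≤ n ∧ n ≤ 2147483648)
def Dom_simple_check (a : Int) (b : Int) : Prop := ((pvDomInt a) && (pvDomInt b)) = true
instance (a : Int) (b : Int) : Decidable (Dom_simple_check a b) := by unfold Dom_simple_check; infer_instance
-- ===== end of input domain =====

-- B replaces A's simultaneous-decrement loop by counting divisors of the
-- invariant difference |a-b| up to sqrt(|a-b|) (objective: faster).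


-- ===== PORT A =====
-- the while loop of A: decrement a and b until one is ≤ 0, counting divisibility hits
def simple_check_loop (a : Int) (b : Int) (count : Int) : Int :=
  if h : a > 0 ∧ b > 0 then
    simple_check_loop (a - 1) (b - 1)
      (if a > b then
        (if PySem.Int.mod a b = 0 then count + 1 else count)
       else
        (if PySem.Int.mod b a = 0 then count + 1 else count))
  else count
termination_by a.toNat
decreasing_by omega

def simple_check (a : Int) (b : Int) : Int := simple_check_loop a b 0

-- ===== PORT B =====
-- the while loop of B: enumerate divisor pairs (i, d // i) of d for i*i ≤ d,
-- counting those that are ≤ m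
def simple_check_alt_loop (d : Int) (m : Int) (i : Int) (count : Int) : Int :=
  if h : i * i ≤ d then
    simple_check_alt_loop d m (i + 1)
      (if PySem.Int.mod d i = 0 then
        (let c1 := if i ≤ m then count + 1 else count
         let j := PySem.Int.floordiv d i
         if j ≠ i ∧ j ≤ m then c1 + 1 else c1)
       else count)
  else count
termination_by (d + 1 - i).toNat
decreasing_by
  have h2 : (0:Int) ≤ (i - 1) * (i - 1) := mul_self_nonneg _
  have h3 : (0:Int) ≤ i * i := mul_self_nonneg _
  have h4 : (i - 1) * (i - 1) = i * i - 2 * i + 1 := by ring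
  omega

def simple_check_alt (a : Int) (b : Int) : Int :=
  let m := if a < b then a else b
  if m ≤ 0 then 0
  else
    let d := if a > b then a - b else b - a
    if d = 0 then m
    else simple_check_alt_loop d m 1 0

-- ===== PRECONDITION & SPEC =====
def Spec_simple_check (a : Int) (b : Int) (out : Int) : Prop := out = simple_check_alt a b
instance (a : Int) (b : Int) (out : Int) : Decidable (Spec_simple_check a b out) := by unfold Spec_simple_check; infer_instance

-- ===== CLAIM (what is proved, stated in full; the proofs are below) =====
def Claim_equal_simple_check : Prop := ∀ (a : Int) (b : Int), Dom_simple_check a b → Spec_simple_check a b (simple_check a b)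

-- ===== LEMMAS AND PROOFS =====

-- the common specification: number of k in [1, m] dividing d
noncomputable def pvN (m : Int) (d : Int) : Int :=
  (((Finset.Icc 1 m).filter (fun k => d % k = 0)).card : Int)

-- the difference, as computed in B
def pvD (a : Int) (b : Int) : Int := if a > b then a - b else b - a

lemma pvN_nonpos (m d : Int) (hm : m ≤ 0) : pvN m d = 0 := by
  unfold pvN
  have : Finset.Icc (1:Int) m = ∅ := Finset.Icc_eq_empty (by omega)
  simp [this]

lemma pvN_zero (m : Int) (hm : 0 ≤ m) : pvN m 0 = m := by
  unfold pvN
  have : (Finset.Icc (1:Int) m).filter (fun k => (0:Int) % k = 0) = Finset.Icc 1 m := by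
    apply Finset.filter_true_of_mem; intro k _; exact Int.zero_emod k
  rw [this, Int.card_Icc]
  omega

lemma pvN_step (m d : Int) (hm : 1 ≤ m) :
    pvN m d = pvN (m - 1) d + (if d % m = 0 then 1 else 0) := by
  unfold pvN
  have hins : Finset.Icc (1:Int) m = insert m (Finset.Icc 1 (m - 1)) := by
    ext k; simp only [Finset.mem_Icc, Finset.mem_insert]; omega
  have hnot : m ∉ (Finset.Icc (1:Int) (m - 1)).filter (fun k => d % k = 0) := by
    simp only [Finset.mem_filter, Finset.mem_Icc]; omega
  rw [hins, Finset.filter_insert]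
  split_ifs with h
  · rw [Finset.card_insert_of_notMem hnot]; push_cast; ring
  · simp

-- A's loop computes pvN (min a b) (pvD a b) shifted by the accumulator
lemma loopA_eq : ∀ (n : Nat) (a b c : Int), (min a b).toNat = n →
    simple_check_loop a b c = c + pvN (min a b) (pvD a b) := by
  intro n
  induction n with
  | zero =>
    intro a b c hn
    rw [simple_check_loop]
    have hnp : ¬ (a > 0 ∧ b > 0) := by omega
    rw [dif_neg hnp, pvN_nonpos _ _ (by omega)]
    ring
  | succ n ih =>
    intro a b c hn
    have hpos : a > 0 ∧ b > 0 := by omega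
    rw [simple_check_loop, dif_pos hpos]
    have hmin : min (a - 1) (b - 1) = min a b - 1 := by omega
    have hD : pvD (a - 1) (b - 1) = pvD a b := by
      unfold pvD; split_ifs <;> omega
    rw [ih (a - 1) (b - 1) _ (by omega), hmin, hD]
    have hstep := pvN_step (min a b) (pvD a b) (by omega)
    -- the loop body increments iff (pvD a b) % (min a b) = 0
    by_cases hab : a > b
    · have hb : (0:Int) < b := hpos.2
      have hmod : PySem.Int.mod a b = a % b := PySem.Int.mod_eq_emod_of_pos hb
      have hmd : pvD a b % min a b = a % b := by
        have h1 : pvD a b = a - b := by unfold pvD; rw [if_pos hab]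
        have h2 : min a b = b := by omega
        rw [h1, h2, Int.sub_emod_right]
      rw [if_pos hab, hmod, hstep, hmd]
      split_ifs <;> ring
    · have ha : (0:Int) < a := hpos.1
      have hmod : PySem.Int.mod b a = b % a := PySem.Int.mod_eq_emod_of_pos ha
      have hmd : pvD a b % min a b = b % a := by
        have h1 : pvD a b = b - a := by unfold pvD; rw [if_neg hab]
        have h2 : min a b = a := by omega
        rw [h1, h2, Int.sub_emod_right]
      rw [if_neg hab, hmod, hstep, hmd]
      split_ifs <;> ring

lemma simple_check_eq (a b : Int) : simple_check a b = pvN (min a b) (pvD a b) := by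
  unfold simple_check
  rw [loopA_eq (min a b).toNat a b 0 rfl]
  ring

-- the set counted by B's loop from index i on
noncomputable def pvS (d m i : Int) : Finset Int :=
  (Finset.Icc 1 m).filter (fun k => d % k = 0 ∧ i ≤ k ∧ i * k ≤ d)

-- a divisor k of d with i*k ≤ d < (i+1)*k forces d = i*k
lemma pvDivKey (d i k : Int) (hi : 1 ≤ i) (hk : 1 ≤ k) (hdk : d % k = 0)
    (h1 : i * k ≤ d) (h2 : d < (i + 1) * k) : d = i * k := by
  obtain ⟨q, hq⟩ := Int.dvd_of_emod_eq_zero hdk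
  have hle : i ≤ q := by nlinarith
  have hlt : q < i + 1 := by nlinarith
  have hqi : q = i := by omega
  rw [hq, hqi]; ring

lemma pvS_subset (d m i : Int) : pvS d m (i + 1) ⊆ pvS d m i := by
  intro k hk
  simp only [pvS, Finset.mem_filter, Finset.mem_Icc] at hk ⊢
  have : (i + 1) * k = i * k + k := by ring
  refine ⟨hk.1, hk.2.1, by omega, by omega⟩

lemma pvS_step (d m i : Int) (hi : 1 ≤ i) (hii : i * i ≤ d) :
    ((pvS d m i).card : Int) =
      (if d % i = 0 then
        (if i ≤ m then (1:Int) else 0) + (if d / i ≠ i ∧ d / i ≤ m then 1 else 0)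
       else 0) + ((pvS d m (i + 1)).card : Int) := by
  have hsub := pvS_subset d m i
  have hcard := Finset.card_sdiff_add_card_eq_card hsub
  have hmem : ∀ k, k ∈ pvS d m i \ pvS d m (i + 1) ↔
      (1 ≤ k ∧ k ≤ m ∧ d % k = 0 ∧ i ≤ k ∧ i * k ≤ d ∧ (k = i ∨ d < (i + 1) * k)) := by
    intro k
    simp only [pvS, Finset.mem_sdiff, Finset.mem_filter, Finset.mem_Icc]
    constructor
    · rintro ⟨⟨⟨h1, h2⟩, h3, h4, h5⟩, h6⟩
      refine ⟨h1, h2, h3, h4, h5, ?_⟩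
      by_contra hc
      push Not at hc
      exact h6 ⟨⟨h1, h2⟩, h3, by omega, by omega⟩
    · rintro ⟨h1, h2, h3, h4, h5, h6⟩
      refine ⟨⟨⟨h1, h2⟩, h3, h4, h5⟩, ?_⟩
      rintro ⟨-, -, h7, h8⟩
      rcases h6 with h6 | h6 <;> omega
  by_cases hdi : d % i = 0
  · -- i divides d; let q = d / i; the step removes {i} and {q} where ≤ m
    obtain ⟨q, hq⟩ := Int.dvd_of_emod_eq_zero hdi
    have hj : d / i = q := by rw [hq]; exact Int.mul_ediv_cancel_left q (by omega)
    have hq1 : 1 ≤ q := by nlinarith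
    have hiq' : i ≤ q := by nlinarith
    have hqd : d % q = 0 := Int.emod_eq_zero_of_dvd ⟨i, by rw [hq]; ring⟩
    have hEeq : pvS d m i \ pvS d m (i + 1) =
        ((Finset.Icc 1 m).filter (fun k => k = i)) ∪ ((Finset.Icc 1 m).filter (fun k => k = q)) := by
      ext k
      rw [hmem k]
      simp only [Finset.mem_union, Finset.mem_filter, Finset.mem_Icc]
      constructor
      · rintro ⟨h1, h2, h3, h4, h5, h6⟩
        rcases h6 with h6 | h6
        · exact Or.inl ⟨⟨h1, h2⟩, h6⟩
        · have hdk := pvDivKey d i k hi h1 h3 h5 h6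
          have hki : k * i = i * k := mul_comm k i
          have hqq : i * q = i * k → q = k := fun h => by
            have := mul_left_cancel₀ (a := i) (by omega : (i:Int) ≠ 0) h
            omega
          have : k = q := by
            have := hqq (by omega)
            omega
          exact Or.inr ⟨⟨h1, h2⟩, this⟩
      · rintro (⟨⟨h1, h2⟩, hk⟩ | ⟨⟨h1, h2⟩, hk⟩) <;> subst hk
        · exact ⟨h1, h2, hdi, le_refl _, hii, Or.inl rfl⟩
        · have ha : i * k ≤ d := by omega
          have hb : d < (i + 1) * k := by
            have : (i + 1) * k = i * k + k := by ring
            omega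
          exact ⟨h1, h2, hqd, hiq', ha, Or.inr hb⟩
    have hfi : ∀ x : Int, (Finset.Icc 1 m).filter (fun k => k = x) =
        if 1 ≤ x ∧ x ≤ m then ({x} : Finset Int) else ∅ := by
      intro x
      ext k
      simp only [Finset.mem_filter, Finset.mem_Icc]
      split_ifs with hx <;> simp <;> omega
    have hcardE : ((pvS d m i \ pvS d m (i + 1)).card : Int) =
        (if i ≤ m then (1:Int) else 0) + (if q ≠ i ∧ q ≤ m then 1 else 0) := by
      rw [hEeq, hfi i, hfi q]
      by_cases hqi : q = i
      · subst hqi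
        have hne : ¬ (q ≠ q ∧ q ≤ m) := by simp
        rw [if_neg hne]
        by_cases him : q ≤ m
        · rw [if_pos ⟨hq1, him⟩, Finset.union_self, if_pos him]
          simp
        · rw [if_neg (fun h => him h.2), Finset.union_self, if_neg him]
          simp
      · by_cases him : i ≤ m
        · by_cases hqm : q ≤ m
          · rw [if_pos ⟨hi, him⟩, if_pos ⟨hq1, hqm⟩, if_pos him, if_pos ⟨hqi, hqm⟩]
            rw [Finset.card_union_of_disjoint (by
              rw [Finset.disjoint_singleton]
              omega)]
            simp
          · rw [if_pos ⟨hi, him⟩, if_neg (fun h => hqm h.2), if_pos him,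
              if_neg (fun h => hqm h.2)]
            simp
        · have hqm : ¬ q ≤ m := by omega
          rw [if_neg (fun h => him h.2), if_neg (fun h => hqm h.2), if_neg him,
            if_neg (fun h => hqm h.2)]
          simp
    rw [if_pos hdi, hj]
    split_ifs at hcardE ⊢ <;> omega
  · -- i does not divide d: nothing is removed
    have hEeq : pvS d m i \ pvS d m (i + 1) = ∅ := by
      ext k
      rw [hmem k]
      simp only [Finset.notMem_empty, iff_false]
      rintro ⟨h1, h2, h3, h4, h5, h6⟩
      rcases h6 with rfl | h6
      · exact hdi h3
      · have hdk := pvDivKey d i k hi h1 h3 h5 h6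
        exact hdi (Int.emod_eq_zero_of_dvd ⟨k, hdk⟩)
    rw [hEeq] at hcard
    simp only [Finset.card_empty, Nat.zero_add] at hcard
    rw [if_neg hdi]
    omega

lemma loopB_eq : ∀ (n : Nat) (d m i c : Int), 1 ≤ i → (d + 1 - i).toNat = n →
    simple_check_alt_loop d m i c = c + ((pvS d m i).card : Int) := by
  intro n
  induction n with
  | zero =>
    intro d m i c hi hn
    rw [simple_check_alt_loop]
    have hstop : ¬ (i * i ≤ d) := by
      intro h
      have : i ≤ i * i := le_mul_of_one_le_left (by omega) hi
      omega
    rw [dif_neg hstop]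
    have hS : pvS d m i = ∅ := by
      ext k
      simp only [pvS, Finset.mem_filter, Finset.mem_Icc, Finset.notMem_empty, iff_false]
      rintro ⟨⟨h1, h2⟩, h3, h4, h5⟩
      have : i * i ≤ i * k := by nlinarith
      exact hstop (by omega)
    rw [hS]
    simp
  | succ n ih =>
    intro d m i c hi hn
    rw [simple_check_alt_loop]
    by_cases hii : i * i ≤ d
    · rw [dif_pos hii, ih d m (i + 1) _ (by omega) (by omega)]
      have hstep := pvS_step d m i hi hii
      have hmodi : PySem.Int.mod d i = d % i := PySem.Int.mod_eq_emod_of_pos (by omega)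
      have hdivi : PySem.Int.floordiv d i = d / i := PySem.Int.floordiv_eq_ediv_of_pos (by omega)
      simp only [hmodi, hdivi]
      split_ifs at hstep ⊢ <;> omega
    · rw [dif_neg hii]
      have hS : pvS d m i = ∅ := by
        ext k
        simp only [pvS, Finset.mem_filter, Finset.mem_Icc, Finset.notMem_empty, iff_false]
        rintro ⟨⟨h1, h2⟩, h3, h4, h5⟩
        have : i * i ≤ i * k := by nlinarith
        omega
      rw [hS]
      simp

lemma pvS_one (d m : Int) (hd : 1 ≤ d) :
    pvS d m 1 = (Finset.Icc 1 m).filter (fun k => d % k = 0) := by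
  unfold pvS
  apply Finset.filter_congr
  intro k hk
  simp only [Finset.mem_Icc] at hk
  constructor
  · rintro ⟨h1, -, -⟩; exact h1
  · intro h1
    have hkd : k ≤ d := Int.le_of_dvd (by omega) (Int.dvd_of_emod_eq_zero h1)
    exact ⟨h1, by omega, by omega⟩

lemma simple_check_alt_eq (a b : Int) : simple_check_alt a b = pvN (min a b) (pvD a b) := by
  unfold simple_check_alt
  have hm : (if a < b then a else b) = min a b := by
    split_ifs <;> omega
  simp only [hm]
  by_cases hm0 : min a b ≤ 0
  · rw [if_pos hm0, pvN_nonpos _ _ hm0]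
  · rw [if_neg hm0]
    by_cases hd0 : (if a > b then a - b else b - a) = 0
    · rw [if_pos hd0]
      have : pvD a b = 0 := hd0
      rw [this, pvN_zero _ (by omega)]
    · rw [if_neg hd0]
      have hDd : (if a > b then a - b else b - a) = pvD a b := rfl
      have hd1 : 1 ≤ pvD a b := by
        unfold pvD at hd0 ⊢
        split_ifs at hd0 ⊢ <;> omega
      rw [hDd, loopB_eq (pvD a b + 1 - 1).toNat (pvD a b) (min a b) 1 0 (by omega) rfl,
        pvS_one _ _ hd1]
      unfold pvN
      ring

-- ===== VERDICT (by name: the statement is the Claim_ definition above) =====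
theorem simple_check_spec : Claim_equal_simple_check := by
  intro a b _
  unfold Spec_simple_check
  rw [simple_check_eq, simple_check_alt_eq]
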